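-- pv_equiv track=rewrite | github.com/yhs3434/Algorithms | baekjun/exercise/2020Feb/14882.py | solution
-- ===== SOURCE A (Python) =====
-- def solution(N, A, x):
--     dp = [0] * (N+1)
--     dp[0] = 1
--     cycle = N+1
--     for i in range(1, N+1):
--         dp[i] = (dp[i-1] * x) % 786433
--         if dp[i] == 1:
--             cycle = i
--             break
--     sumVal = 0
--     for i in range(N+1):
--         sumVal += A[i]*dp[i%cycle]
--     return sumVal
-- ===== SOURCE B (Python) =====
-- def solution(N, A, x):
--     # Single streaming pass: running modular power p = x**i % 786433
--     sumVal = 0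
--     p = 1
--     for i in range(N+1):
--         sumVal += A[i] * p
--         p = (p * x) % 786433
--     return sumVal
-- ===== Notes on version B (the rewrite author's own statement) =====
-- stated objective: simpler
-- what changed: B replaces A's two-phase algorithm (build a power table with cycle detection, then scan it via i % cycle lookups) with one streaming pass that maintains a single running modular power scalar.
import Mathlib
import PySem

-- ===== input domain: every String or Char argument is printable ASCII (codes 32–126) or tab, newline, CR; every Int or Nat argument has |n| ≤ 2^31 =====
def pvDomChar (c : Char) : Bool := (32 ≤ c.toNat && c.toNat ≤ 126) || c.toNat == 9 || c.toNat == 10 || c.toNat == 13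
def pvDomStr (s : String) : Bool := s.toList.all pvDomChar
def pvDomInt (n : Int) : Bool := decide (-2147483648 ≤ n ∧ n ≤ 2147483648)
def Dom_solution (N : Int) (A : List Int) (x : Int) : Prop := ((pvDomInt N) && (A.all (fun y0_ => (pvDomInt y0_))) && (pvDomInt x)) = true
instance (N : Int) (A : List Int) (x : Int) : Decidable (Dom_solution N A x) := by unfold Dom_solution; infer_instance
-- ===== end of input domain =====

-- B is one streaming pass with a running modular power scalar instead of A's
-- cycle-detected power table plus table-lookup scan (objective: simpler).

-- ===== PORT A =====
-- first loop of A: for i in range(1, N+1): dp[i] = (dp[i-1]*x) % 786433; break on dp[i] == 1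
def solutionLoop1 (x : Int) : List Int → List Int → Int → List Int × Int
  | [], dp, cycle => (dp, cycle)
  | i :: rest, dp, cycle =>
    let v := PySem.Int.mod (PySem.List.pyGetD dp (i - 1) 0 * x) 786433
    let dp' := PySem.List.pySetD dp i v
    if v = 1 then (dp', i) else solutionLoop1 x rest dp' cycle

def solution (N : Int) (A : List Int) (x : Int) : Int :=
  let dp0 := List.replicate (N + 1).toNat (0 : Int)        -- dp = [0] * (N+1)
  let dp1 := PySem.List.pySetD dp0 0 1                     -- dp[0] = 1 (IndexError for N < 0: outside Pre_)
  let r := solutionLoop1 x (PySem.List.pyRange 1 (N + 1) 1) dp1 (N + 1)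
  (PySem.List.pyRange 0 (N + 1) 1).foldl
    (fun sumVal i =>
      sumVal + PySem.List.pyGetD A i 0 * PySem.List.pyGetD r.1 (PySem.Int.mod i r.2) 0) 0

-- ===== PORT B =====
def solution_alt (N : Int) (A : List Int) (x : Int) : Int :=
  ((PySem.List.pyRange 0 (N + 1) 1).foldl
    (fun (sp : Int × Int) i =>
      (sp.1 + PySem.List.pyGetD A i 0 * sp.2, PySem.Int.mod (sp.2 * x) 786433)) (0, 1)).1

-- ===== PRECONDITION & SPEC =====
-- Pre_: exactly where A returns — N ≥ 0 (else dp[0] = 1 raises on the empty dp)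
-- and A long enough for A[i], i = 0..N (else the sum loop raises IndexError).
def Pre_solution (N : Int) (A : List Int) (x : Int) : Prop :=
  0 ≤ N ∧ N + 1 ≤ (A.length : Int)
instance (N : Int) (A : List Int) (x : Int) : Decidable (Pre_solution N A x) := by
  unfold Pre_solution; infer_instance

def pvWitness_solution : Int × List Int × Int := (3, [2, -1, 4, 7], 5)

def Spec_solution (N : Int) (A : List Int) (x : Int) (out : Int) : Prop := out = solution_alt N A x
instance (N : Int) (A : List Int) (x : Int) (out : Int) : Decidable (Spec_solution N A x out) := by unfold Spec_solution; infer_instance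

-- ===== CLAIM (what is proved, stated in full; the proofs are below) =====
def Claim_equal_solution : Prop := ∀ (N : Int) (A : List Int) (x : Int), Dom_solution N A x → Pre_solution N A x → Spec_solution N A x (solution N A x)

-- ===== LEMMAS AND PROOFS =====

-- (x^m % M) * x % M = x^(m+1) % M
theorem pvPowStep (x : Int) (m : Nat) :
    (x ^ m % 786433) * x % 786433 = x ^ (m + 1) % 786433 := by
  rw [pow_succ]
  conv_rhs => rw [Int.mul_emod]
  conv_lhs => rw [Int.mul_emod]
  rw [Int.emod_emod_of_dvd _ dvd_rfl]

-- x^c ≡ 1 → x^(m % c) ≡ x^m  (mod 786433)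
theorem pvPowCycle (x : Int) (c m : Nat) (_hc : 0 < c)
    (h1 : x ^ c % 786433 = 1) :
    x ^ (m % c) % 786433 = x ^ m % 786433 := by
  have hcong : Int.ModEq 786433 (x ^ c) 1 := by
    unfold Int.ModEq
    rw [h1]
    decide
  have h2 : Int.ModEq 786433 (x ^ m) (x ^ (m % c)) := by
    conv_lhs => rw [← Nat.div_add_mod m c, pow_add, pow_mul]
    have h3 := (hcong.pow (m / c)).mul_right (x ^ (m % c))
    simpa using h3
  exact h2.symm

-- invariant for A's first loop
theorem pvLoop1Spec (x n : Int) (hn : 1 ≤ n) :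
    ∀ (m : Nat) (k : Int) (dp : List Int), 1 ≤ k → k ≤ n → (n - k).toNat = m →
      dp.length = n.toNat →
      (∀ j : Nat, j < k.toNat → dp.getD j 0 = x ^ j % 786433) →
      (solutionLoop1 x (PySem.List.pyRange k n 1) dp n).1.length = n.toNat ∧
      (((solutionLoop1 x (PySem.List.pyRange k n 1) dp n).2 = n ∧
          ∀ j : Nat, j < n.toNat →
            (solutionLoop1 x (PySem.List.pyRange k n 1) dp n).1.getD j 0 = x ^ j % 786433) ∨
        (1 ≤ (solutionLoop1 x (PySem.List.pyRange k n 1) dp n).2 ∧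
          (solutionLoop1 x (PySem.List.pyRange k n 1) dp n).2 < n ∧
          x ^ ((solutionLoop1 x (PySem.List.pyRange k n 1) dp n).2).toNat % 786433 = 1 ∧
          ∀ j : Nat, j < ((solutionLoop1 x (PySem.List.pyRange k n 1) dp n).2).toNat →
            (solutionLoop1 x (PySem.List.pyRange k n 1) dp n).1.getD j 0 = x ^ j % 786433)) := by
  intro m
  induction m with
  | zero =>
    intro k dp hk1 hkn hm hlen hdp
    have hkn' : n ≤ k := by omega
    rw [PySem.List.pyRange_one_eq_nil hkn']
    have hk : k = n := le_antisymm hkn hkn'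
    subst hk
    exact ⟨hlen, Or.inl ⟨rfl, hdp⟩⟩
  | succ m ih =>
    intro k dp hk1 hkn hm hlen hdp
    have hklt : k < n := by omega
    rw [PySem.List.pyRange_one_cons hklt]
    have hk0 : (0 : Int) ≤ k - 1 := by omega
    have hk1lt : (k - 1).toNat < k.toNat := by omega
    have hget : PySem.List.pyGetD dp (k - 1) 0 = x ^ (k - 1).toNat % 786433 := by
      rw [PySem.List.pyGetD_of_nonneg dp 0 hk0]
      exact hdp _ hk1lt
    have hsucc : (k - 1).toNat + 1 = k.toNat := by omega
    have hv : PySem.Int.mod (PySem.List.pyGetD dp (k - 1) 0 * x) 786433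
        = x ^ k.toNat % 786433 := by
      rw [hget, PySem.Int.mod_eq_emod_of_pos (by norm_num), pvPowStep, hsucc]
    have hlen' : (dp.set k.toNat (x ^ k.toNat % 786433)).length = n.toNat := by
      simp [hlen]
    have hdp' : ∀ j : Nat, j < (k + 1).toNat →
        (dp.set k.toNat (x ^ k.toNat % 786433)).getD j 0 = x ^ j % 786433 := by
      intro j hj
      by_cases hjk : j = k.toNat
      · subst hjk
        rw [List.getD_eq_getElem?_getD, List.getElem?_set_self (by omega)]
        simp
      · rw [List.getD_eq_getElem?_getD, List.getElem?_set_ne (by omega), ← List.getD_eq_getElem?_getD]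
        exact hdp j (by omega)
    simp only [solutionLoop1]
    rw [hv, PySem.List.pySetD_of_nonneg dp _ (by omega)]
    by_cases hone : x ^ k.toNat % 786433 = 1
    · rw [if_pos hone]
      exact ⟨hlen', Or.inr ⟨hk1, hklt, by simpa using hone,
        fun j hj => hdp' j (by omega)⟩⟩
    · rw [if_neg hone]
      exact ih (k + 1) _ (by omega) (by omega) (by omega) hlen' hdp'

-- B's loop from index k with running power x^k % 786433 computes the reference sum
theorem pvLoopBSpec (A : List Int) (x n : Int) :
    ∀ (m : Nat) (k s : Int), 0 ≤ k → (n - k).toNat = m →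
      ((PySem.List.pyRange k n 1).foldl
        (fun (sp : Int × Int) i =>
          (sp.1 + PySem.List.pyGetD A i 0 * sp.2, PySem.Int.mod (sp.2 * x) 786433))
        (s, x ^ k.toNat % 786433)).1 =
      (PySem.List.pyRange k n 1).foldl
        (fun sumVal i => sumVal + PySem.List.pyGetD A i 0 * (x ^ i.toNat % 786433)) s := by
  intro m
  induction m with
  | zero =>
    intro k s hk hm
    rw [PySem.List.pyRange_one_eq_nil (by omega)]
    rfl
  | succ m ih =>
    intro k s hk hm
    have hklt : k < n := by omega
    rw [PySem.List.pyRange_one_cons hklt]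
    simp only [List.foldl_cons]
    have hp : PySem.Int.mod (x ^ k.toNat % 786433 * x) 786433 = x ^ (k + 1).toNat % 786433 := by
      rw [PySem.Int.mod_eq_emod_of_pos (by norm_num), pvPowStep]
      have hs : k.toNat + 1 = (k + 1).toNat := by omega
      rw [hs]
    rw [hp]
    exact ih (k + 1) _ (by omega) (by omega)

-- ===== VERDICT (by name: the statement is the Claim_ definition above) =====
theorem solution_spec : Claim_equal_solution := by
  intro N A x _ hpre
  obtain ⟨hN, hA⟩ := hpre
  unfold Spec_solution
  simp only [solution, solution_alt]
  set n := N + 1 with hn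
  have hn1 : 1 ≤ n := by omega
  have hlen0 : (PySem.List.pySetD (List.replicate n.toNat (0 : Int)) 0 1).length = n.toNat := by
    rw [PySem.List.pySetD_of_nonneg _ _ (by omega)]
    simp
  have hdp0 : ∀ j : Nat, j < (1 : Int).toNat →
      (PySem.List.pySetD (List.replicate n.toNat (0 : Int)) 0 1).getD j 0 = x ^ j % 786433 := by
    intro j hj
    have hj0 : j = 0 := by omega
    subst hj0
    rw [PySem.List.pySetD_of_nonneg _ _ (by omega)]
    have h00 : (0 : Int).toNat = 0 := rfl
    rw [h00, List.getD_eq_getElem?_getD, List.getElem?_set_self (by simp; omega)]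
    norm_num
  have hinv := pvLoop1Spec x n hn1 (n - 1).toNat 1
    (PySem.List.pySetD (List.replicate n.toNat (0 : Int)) 0 1)
    (le_refl 1) hn1 rfl hlen0 hdp0
  set r := solutionLoop1 x (PySem.List.pyRange 1 n 1)
    (PySem.List.pySetD (List.replicate n.toNat (0 : Int)) 0 1) n with hr
  obtain ⟨hlenF, hcase⟩ := hinv
  have hB := pvLoopBSpec A x n n.toNat 0 0 (le_refl 0) (by omega)
  have h1 : ((0 : Int), (1 : Int)) = ((0 : Int), x ^ (0 : Int).toNat % 786433) := by
    norm_num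
  rw [h1, hB]
  refine PySem.List.foldl_congr_mem _ _ _ _ ?_
  intro sumVal i hi
  rw [PySem.List.mem_pyRange_one] at hi
  have hfac : PySem.List.pyGetD r.1 (PySem.Int.mod i r.2) 0 = x ^ i.toNat % 786433 := by
    rcases hcase with ⟨hc, hall⟩ | ⟨hc1, hclt, hcyc, hall⟩
    · rw [hc]
      have hmod : PySem.Int.mod i n = i := by
        rw [PySem.Int.mod_eq_emod_of_pos (by omega)]
        exact Int.emod_eq_of_lt hi.1 hi.2
      rw [hmod, PySem.List.pyGetD_of_nonneg _ _ hi.1]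
      exact hall i.toNat (by omega)
    · have hcpos : (0 : Int) < r.2 := by omega
      have hmodlt := Int.emod_lt_of_pos i hcpos
      have hmodnn := Int.emod_nonneg i (by omega : r.2 ≠ 0)
      rw [PySem.Int.mod_eq_emod_of_pos hcpos]
      rw [PySem.List.pyGetD_of_nonneg _ _ hmodnn]
      have hjlt : (i % r.2).toNat < r.2.toNat := by
        have hcast : ((i % r.2).toNat : Int) < (r.2.toNat : Int) := by
          rw [Int.toNat_of_nonneg hmodnn, Int.toNat_of_nonneg hcpos.le]
          exact hmodlt
        exact_mod_cast hcast
      rw [hall _ hjlt]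
      have htn : (i % r.2).toNat = i.toNat % (r.2).toNat := by
        have h1 : i % r.2 = ((i.toNat % r.2.toNat : Nat) : Int) := by
          push_cast
          rw [Int.toNat_of_nonneg hi.1, Int.toNat_of_nonneg hcpos.le]
        rw [h1, Int.toNat_natCast]
      rw [htn]
      exact pvPowCycle x _ _ (by omega) hcyc
  rw [hfac]
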